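-- pv_equiv track=rewrite | github.com/samgiz/Competitive_Programming | gsa_ultra/2020 summer/hardcore_parkour.py | solution
-- ===== SOURCE A (Python) =====
-- def solution(ps):
--     # Just a large value to use instead of infinity
--     LARGE = int(1e9)
--     # The answers so far. Map current index -> speed -> least time taken to be at this index at this speed
--     dp = {}
--     # Initialize with the first level
--     for i in ps[0]:
--         dp[i] = {5: 5}
--     # Go over the remaining levels
--     for i in range(1, len(ps)):
--         # Sort the platform heights, so we can use a sliding window
--         p = sorted(j for j in ps[i])
--         new_dp = {}
--         dp_vals = sorted(dp.keys())
--         # Where to start the sliding window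
--         start = 0
--         # Iterate over new pillar sizes
--         for j in p:
--             # Increase sliding windows size if necessary
--             while start != len(dp_vals) and dp_vals[start] < j - 5:
--                 start += 1
--             if start == len(dp_vals):
--                 break
--             new_dp_j = {}
--             cur = start
--             # Iterate over sliding window of pillars from which we can jump to j
--             while cur < len(dp_vals) and dp_vals[cur] <= j + 5:
--                 # do some local caching
--                 el = dp_vals[cur]
--                 d = dp[el]
--                 # Calculate the new dp values
--                 for speed in d:
--                     cost = d[speed]
--                     if el < j:
--                         m = min(10, speed + 1)
--                         new_dp_j[m] = min(new_dp_j.get(m, LARGE), cost + m)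
--                     elif el > j:
--                         m = max(1, speed - 1)
--                         new_dp_j[m] = min(new_dp_j.get(m, LARGE), cost + m)
--                     else:
--                         new_dp_j[speed] = min(new_dp_j.get(speed, LARGE), cost + speed)
--                 cur += 1
--             # prune out sctrictly worse speed values at the same location
--             m = LARGE
--             for k, v in sorted(new_dp_j.items()):
--                 if v >= m:
--                     del new_dp_j[k]
--                 m = min(m, v)
--             new_dp[j] = new_dp_j
--         dp = new_dp
--     # get the answer
--     ans = min([dp[i][j] for i in dp for j in dp[i]])
--     return ans
-- ===== SOURCE B (Python) =====
-- LARGE = 10 ** 9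
--
--
-- def solution(ps):
--     # Functional rewrite: per-target filtered window + dict comprehensions
--     # instead of A's two-pointer window, break and in-place pruning deletes.
--     dp = {h: {5: 5} for h in ps[0]}
--     for level in ps[1:]:
--         keys = sorted(dp)
--         new = {}
--         for j in sorted(level):
--             if not keys or keys[-1] < j - 5:
--                 continue
--             cand = {}
--             for el in [e for e in keys if j - 5 <= e <= j + 5]:
--                 for s, c in dp[el].items():
--                     m = s if el == j else (min(10, s + 1) if el < j else max(1, s - 1))
--                     cand[m] = min(cand.get(m, LARGE), c + m)
--             new[j] = {k: v for k, v in cand.items()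
--                       if v < min((w for q, w in cand.items() if q < k), default=LARGE)}
--         dp = new
--     return min(c for d in dp.values() for c in d.values())
-- ===== Notes on version B (the rewrite author's own statement) =====
-- stated objective: simpler
-- what changed: Replaced A's imperative two-pointer sliding window with break, index-mutating while loops and in-place pruning deletes by a functional rewrite: a per-target filtered window, a single merge loop over dict items, and dict/list comprehensions with a declarative Pareto-keep predicate.
-- outside the precondition, e.g. on solution([]): A raises IndexError, B raises IndexError; on solution([[0], [100]]): A raises ValueError, B raises ValueError
import Mathlib
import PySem

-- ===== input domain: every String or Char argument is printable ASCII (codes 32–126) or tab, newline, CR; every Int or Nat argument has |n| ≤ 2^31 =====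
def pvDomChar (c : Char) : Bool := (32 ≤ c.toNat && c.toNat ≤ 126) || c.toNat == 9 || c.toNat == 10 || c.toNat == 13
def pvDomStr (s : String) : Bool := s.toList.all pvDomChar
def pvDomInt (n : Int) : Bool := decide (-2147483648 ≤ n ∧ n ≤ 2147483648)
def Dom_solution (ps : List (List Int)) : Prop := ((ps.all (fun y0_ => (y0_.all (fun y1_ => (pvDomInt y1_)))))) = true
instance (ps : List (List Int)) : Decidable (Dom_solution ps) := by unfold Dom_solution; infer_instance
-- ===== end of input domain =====

-- B is a functional rewrite of A (filtered windows and dict comprehensions instead of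
-- two-pointer window state, break and in-place deletes); same asymptotic cost, no speed claim.

-- ===== PORT A =====

-- inner 'for speed in d' loop (cost = d[speed]: speed ranges over d's keys, so the
-- lookup cannot raise; getD 0 is exact there)
def pvA_inner (j el : Int) (d : PySem.Dict Int Int) (ndj : PySem.Dict Int Int) :
    PySem.Dict Int Int :=
  d.keys.foldl (fun ndj speed =>
    let cost := d.getD speed 0
    if el < j then
      let m := min 10 (speed + 1)
      ndj.insert m (min (ndj.getD m 1000000000) (cost + m))
    else if el > j then
      let m := max 1 (speed - 1)
      ndj.insert m (min (ndj.getD m 1000000000) (cost + m))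
    else
      ndj.insert speed (min (ndj.getD speed 1000000000) (cost + speed))) ndj

-- 'while start != len(dp_vals) and dp_vals[start] < j - 5' (start ≤ len always, so != is <)
def pvA_adv (dvals : List Int) (j : Int) (start : Nat) : Nat :=
  if h : start < dvals.length then
    if dvals[start] < j - 5 then pvA_adv dvals j (start + 1) else start
  else start
termination_by dvals.length - start

-- 'while cur < len(dp_vals) and dp_vals[cur] <= j + 5' (el is a key of dp, so dp[el]
-- cannot raise; getD empty is exact there)
def pvA_window (dp : PySem.Dict Int (PySem.Dict Int Int)) (dvals : List Int) (j : Int)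
    (cur : Nat) (ndj : PySem.Dict Int Int) : PySem.Dict Int Int :=
  if h : cur < dvals.length then
    if dvals[cur] ≤ j + 5 then
      pvA_window dp dvals j (cur + 1) (pvA_inner j dvals[cur] (dp.getD dvals[cur] PySem.Dict.empty) ndj)
    else ndj
  else ndj
termination_by dvals.length - cur

-- 'for k, v in sorted(new_dp_j.items()): …'.  Python sorts the (key, value) tuples
-- lexicographically; a dict's keys are distinct, so that order is the order by key.
def pvA_prune (ndj : PySem.Dict Int Int) : PySem.Dict Int Int :=
  ((PySem.List.sorted ndj.items (fun p => p.1)).foldl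
    (fun st kv => (if kv.2 ≥ st.2 then st.1.erase kv.1 else st.1, min st.2 kv.2))
    (ndj, (1000000000 : Int))).1

-- 'for j in p: …' with its break
def pvA_level (dp : PySem.Dict Int (PySem.Dict Int Int)) (dvals : List Int) :
    List Int → Nat → PySem.Dict Int (PySem.Dict Int Int) → PySem.Dict Int (PySem.Dict Int Int)
  | [], _, nd => nd
  | j :: rest, start, nd =>
    let s' := pvA_adv dvals j start
    if s' = dvals.length then nd
    else pvA_level dp dvals rest s'
      (nd.insert j (pvA_prune (pvA_window dp dvals j s' PySem.Dict.empty)))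

def pvA_step (dp : PySem.Dict Int (PySem.Dict Int Int)) (lvl : List Int) :
    PySem.Dict Int (PySem.Dict Int Int) :=
  pvA_level dp (PySem.List.sorted dp.keys (fun x => x))
    (PySem.List.sorted lvl (fun x => x)) 0 PySem.Dict.empty

def solution (ps : List (List Int)) : Int :=
  -- ps[0] raises IndexError on ps = []; outside Pre_, so the default [] is unclaimed there
  let dp0 := (PySem.List.pyGetD ps 0 []).foldl
    (fun d i => d.insert i (PySem.Dict.empty.insert 5 5)) PySem.Dict.empty
  let dp := (PySem.List.pyRange 1 (PySem.List.len ps)).foldl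
    (fun dp i => pvA_step dp (PySem.List.pyGetD ps i [])) dp0
  -- min([dp[i][j] for i in dp for j in dp[i]]); min([]) raises ValueError, outside Pre_
  let costs := dp.keys.flatMap (fun i =>
    (dp.getD i PySem.Dict.empty).keys.map (fun j => (dp.getD i PySem.Dict.empty).getD j 0))
  (PySem.List.min? costs (fun x => x)).getD 0

-- ===== PORT B =====

-- one new platform j: filtered window, merged candidates, Pareto filter
def pvB_entry (dp : PySem.Dict Int (PySem.Dict Int Int)) (keys : List Int) (j : Int) :
    PySem.Dict Int Int :=
  let window := keys.filter (fun e => decide (j - 5 ≤ e ∧ e ≤ j + 5))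
  let cand : PySem.Dict Int Int := window.foldl (fun cand el =>
    (dp.getD el PySem.Dict.empty).items.foldl (fun cand sc =>
      let m := if el == j then sc.1 else if el < j then min 10 (sc.1 + 1) else max 1 (sc.1 - 1)
      cand.insert m (min (cand.getD m 1000000000) (sc.2 + m))) cand) PySem.Dict.empty
  let keep : List (Int × Int) := cand.items.filter (fun kv =>
    decide (kv.2 < PySem.List.minD ((cand.items.filter (fun qw => decide (qw.1 < kv.1))).map
      (fun qw => qw.2)) (fun x : Int => x) (1000000000 : Int)))
  keep.foldl (fun d kv => d.insert kv.1 kv.2) PySem.Dict.empty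

def pvB_step (dp : PySem.Dict Int (PySem.Dict Int Int)) (level : List Int) :
    PySem.Dict Int (PySem.Dict Int Int) :=
  let keys := PySem.List.sorted dp.keys (fun x => x)
  (PySem.List.sorted level (fun x => x)).foldl (fun nd j =>
    match PySem.List.pyGet? keys (-1) with
    | none => nd
    | some k => if k < j - 5 then nd else nd.insert j (pvB_entry dp keys j)) PySem.Dict.empty

def solution_alt (ps : List (List Int)) : Int :=
  -- ps[0] raises IndexError on ps = []; outside Pre_, so the default [] is unclaimed there
  let dp0 := (PySem.List.pyGetD ps 0 []).foldl
    (fun d h => d.insert h (PySem.Dict.empty.insert 5 5)) PySem.Dict.empty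
  let dp := (PySem.List.slice ps (some 1) none).foldl pvB_step dp0
  -- min(…) raises ValueError on an empty generator, outside Pre_
  (PySem.List.min? (dp.values.flatMap (fun d => d.values)) (fun x => x)).getD 0

-- ===== PRECONDITION & SPEC =====
-- Pre_ excludes exactly the inputs where the Python A raises: ps = [] (IndexError on
-- ps[0]) and inputs with no ±5-chain of platform heights through all the levels, where
-- the final min() is applied to an empty sequence (ValueError).
def Pre_solution (ps : List (List Int)) : Prop :=
  ps ≠ [] ∧
    (ps.drop 1).foldl
      (fun acc lvl => lvl.filter (fun h => acc.any (fun e => decide ((h - e).natAbs ≤ 5))))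
      (ps.headD []) ≠ []
instance (ps : List (List Int)) : Decidable (Pre_solution ps) := by
  unfold Pre_solution; infer_instance

def pvWitness_solution : List (List Int) := [[0], [3]]

def Spec_solution (ps : List (List Int)) (out : Int) : Prop := out = solution_alt ps
instance (ps : List (List Int)) (out : Int) : Decidable (Spec_solution ps out) := by
  unfold Spec_solution; infer_instance

-- ===== CLAIM (what is proved, stated in full; the proofs are below) =====
def Claim_equal_solution : Prop :=
  ∀ (ps : List (List Int)), Dom_solution ps → Pre_solution ps → Spec_solution ps (solution ps)

-- ===== LEMMAS AND PROOFS =====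

-- ---- generic min / foldl-min helpers ----

theorem pv_foldl_min_min (t : List Int) (m x : Int) :
    t.foldl min (min m x) = min m (t.foldl min x) := by
  induction t generalizing m x with
  | nil => rfl
  | cons a t ih =>
    simp only [List.foldl_cons]
    rw [min_assoc, ih]

theorem pv_foldl_min_le_init (t : List Int) (x : Int) : t.foldl min x ≤ x := by
  induction t generalizing x with
  | nil => simp
  | cons a t ih =>
    simp only [List.foldl_cons]
    exact le_trans (ih _) (min_le_left _ _)

theorem pv_minD_eq_foldl (xs : List Int) (L : Int) (h : ∀ v ∈ xs, v ≤ L) :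
    PySem.List.minD xs (fun x => x) L = xs.foldl min L := by
  unfold PySem.List.minD
  cases xs with
  | nil => rfl
  | cons x t =>
    rw [PySem.List.min?_id_cons]
    simp only [Option.getD_some, List.foldl_cons]
    rw [pv_foldl_min_min]
    exact (min_eq_right (le_trans (pv_foldl_min_le_init t x) (h x (by simp)))).symm

theorem pv_foldl_min_perm {xs ys : List Int} (h : xs.Perm ys) (m : Int) :
    xs.foldl min m = ys.foldl min m :=
  List.Perm.foldl_op_eq h


-- ---- the pruning loop as a filter ----

def pvDelKeys (m : Int) : List (Int × Int) → List Int
  | [] => []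
  | kv :: t =>
    if kv.2 ≥ m then kv.1 :: pvDelKeys (min m kv.2) t else pvDelKeys (min m kv.2) t

theorem pv_prune_fold (s : List (Int × Int)) : ∀ (d : PySem.Dict Int Int) (m : Int),
    (s.foldl (fun st kv => (if kv.2 ≥ st.2 then st.1.erase kv.1 else st.1, min st.2 kv.2))
      (d, m)).1 = (pvDelKeys m s).foldl (fun d k => d.erase k) d := by
  induction s with
  | nil => intro d m; rfl
  | cons kv t ih =>
    intro d m
    simp only [List.foldl_cons, pvDelKeys]
    by_cases h : kv.2 ≥ m
    · simp only [h, if_pos, List.foldl_cons]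
      exact ih _ _
    · simp only [h, if_false]
      exact ih _ _

theorem pv_erase_items (d : PySem.Dict Int Int) (k : Int) :
    (d.erase k).items = d.items.filter (fun p => !(p.1 == k)) := rfl

theorem pv_foldl_erase_items (ks : List Int) (d : PySem.Dict Int Int) :
    (ks.foldl (fun d k => d.erase k) d).items
      = d.items.filter (fun p => !(ks.contains p.1)) := by
  induction ks generalizing d with
  | nil => simp
  | cons k t ih =>
    simp only [List.foldl_cons]
    rw [ih, pv_erase_items, List.filter_filter]
    apply List.filter_congr
    intro p _
    simp only [List.contains_cons]
    cases h : p.1 == k <;> simp_all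

theorem pv_delKeys_eq (s : List (Int × Int)) (hp : s.Pairwise (fun a b => a.1 < b.1)) :
    ∀ (m : Int), pvDelKeys m s
      = (s.filter (fun kv => !decide (kv.2 <
          ((s.filter (fun qw => decide (qw.1 < kv.1))).map (fun qw => qw.2)).foldl min m))).map
          (fun kv => kv.1) := by
  induction s with
  | nil => intro m; rfl
  | cons kv t ih =>
    intro m
    have hhead := (List.pairwise_cons.mp hp).1
    have ht := (List.pairwise_cons.mp hp).2
    -- head: no smaller keys in kv :: t
    have h0 : (kv :: t).filter (fun qw => decide (qw.1 < kv.1)) = [] := by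
      rw [List.filter_eq_nil_iff]
      intro qw hqw
      rcases List.mem_cons.mp hqw with h | h
      · subst h; simp
      · simp only [decide_eq_true_eq]
        exact not_lt.mpr (le_of_lt (hhead qw h))
    -- tail: the filter over kv :: t is kv.2 consed to the filter over t
    have hcong : t.filter (fun kv' => !decide (kv'.2 <
          (((kv :: t).filter (fun qw => decide (qw.1 < kv'.1))).map (fun qw => qw.2)).foldl min m))
        = t.filter (fun kv' => !decide (kv'.2 <
          ((t.filter (fun qw => decide (qw.1 < kv'.1))).map (fun qw => qw.2)).foldl min (min m kv.2))) := by
      apply List.filter_congr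
      intro kv' h'
      have h1 : (kv :: t).filter (fun qw => decide (qw.1 < kv'.1))
          = kv :: t.filter (fun qw => decide (qw.1 < kv'.1)) := by
        simp [hhead kv' h']
      rw [h1, List.map_cons, List.foldl_cons]
    have hih := ih ht (min m kv.2)
    simp only [pvDelKeys]
    rw [List.filter_cons]
    simp only [h0, List.map_nil, List.foldl_nil]
    by_cases h : kv.2 ≥ m
    · rw [if_pos h, if_pos (by simp [not_lt.mpr h]), hcong, hih, List.map_cons]
    · rw [if_neg h, if_neg (by simp [lt_of_not_ge h]), hcong, hih]

theorem pv_mem_fst_unique {s : List (Int × Int)} (h : (s.map Prod.fst).Nodup)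
    {a b : Int × Int} (ha : a ∈ s) (hb : b ∈ s) (hfst : a.1 = b.1) : a = b :=
  List.inj_on_of_nodup_map h ha hb hfst

theorem pv_prune_eq (c : PySem.Dict Int Int) (hnd : c.keys.Nodup)
    (hval : ∀ v ∈ c.values, v ≤ 1000000000) :
    pvA_prune c = (c.items.filter (fun kv =>
        decide (kv.2 < PySem.List.minD ((c.items.filter (fun qw => decide (qw.1 < kv.1))).map
          (fun qw => qw.2)) (fun x : Int => x) (1000000000 : Int)))).foldl
      (fun d kv => d.insert kv.1 kv.2) PySem.Dict.empty := by
  have hkeys : c.items.map (fun p : Int × Int => p.1) = c.keys := rfl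
  have hperm : (PySem.List.sorted c.items (fun p : Int × Int => p.1)).Perm c.items :=
    PySem.List.sorted_perm _ _ _
  set s := PySem.List.sorted c.items (fun p : Int × Int => p.1) with hs
  have hfnd : (s.map (fun p : Int × Int => p.1)).Nodup := by
    rw [(hperm.map (fun p : Int × Int => p.1)).nodup_iff, hkeys]
    exact hnd
  have hlt : s.Pairwise (fun a b => a.1 < b.1) := by
    have hle : s.Pairwise (fun a b => a.1 ≤ b.1) :=
      PySem.List.sorted_pairwise c.items (fun p : Int × Int => p.1)
    have hne : s.Pairwise (fun a b => a.1 ≠ b.1) := List.pairwise_map.mp hfnd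
    exact (hle.and hne).imp (fun h => lt_of_le_of_ne h.1 h.2)
  have hvalmem : ∀ kv ∈ c.items, kv.2 ∈ c.values := by
    intro kv h
    exact List.mem_map_of_mem h
  -- the kept item list
  set keep := c.items.filter (fun kv =>
      decide (kv.2 < PySem.List.minD ((c.items.filter (fun qw => decide (qw.1 < kv.1))).map
        (fun qw => qw.2)) (fun x : Int => x) (1000000000 : Int))) with hkeep
  have hkeepnd : (keep.map (fun kv : Int × Int => kv.1)).Nodup := by
    have hsub : (keep.map (fun kv : Int × Int => kv.1)).Sublist
        (c.items.map (fun p : Int × Int => p.1)) := List.filter_sublist.map _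
    rw [hkeys] at hsub
    exact hnd.sublist hsub
  apply PySem.Dict.ext
  rw [PySem.Dict.items_foldl_insert_fresh keep (fun kv => kv.1) (fun kv => kv.2)
    PySem.Dict.empty (by intro a _; simp [PySem.Dict.contains_empty]) hkeepnd]
  unfold pvA_prune
  rw [← hs, pv_prune_fold, pv_foldl_erase_items, pv_delKeys_eq s hlt]
  have hemp : (PySem.Dict.empty : PySem.Dict Int Int).items = [] := rfl
  rw [hemp, List.nil_append]
  have hid : keep.map (fun kv : Int × Int => (kv.1, kv.2)) = keep := by
    simp
  rw [hid, hkeep]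
  apply List.filter_congr
  intro p hp
  have hps : p ∈ s := hperm.mem_iff.mpr hp
  have hmins : ∀ x : Int,
      ((s.filter (fun qw => decide (qw.1 < x))).map (fun qw => qw.2)).foldl min 1000000000
        = PySem.List.minD ((c.items.filter (fun qw => decide (qw.1 < x))).map
            (fun qw => qw.2)) (fun x : Int => x) (1000000000 : Int) := by
    intro x
    have hbound : ∀ v ∈ (c.items.filter (fun qw => decide (qw.1 < x))).map
        (fun qw : Int × Int => qw.2), v ≤ 1000000000 := by
      intro v hv
      obtain ⟨kv, hkv, rfl⟩ := List.mem_map.mp hv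
      exact hval _ (hvalmem _ (List.mem_of_mem_filter hkv))
    rw [pv_minD_eq_foldl _ _ hbound]
    exact pv_foldl_min_perm ((hperm.filter _).map _) _
  by_cases hc : p.2 < PySem.List.minD ((c.items.filter (fun qw => decide (qw.1 < p.1))).map
      (fun qw => qw.2)) (fun x : Int => x) (1000000000 : Int)
  · -- kept: its key is not among the deleted keys
    have hnotmem : p.1 ∉ (s.filter (fun kv => !decide (kv.2 <
        ((s.filter (fun qw => decide (qw.1 < kv.1))).map (fun qw => qw.2)).foldl
          min 1000000000))).map (fun kv => kv.1) := by
      intro hmem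
      obtain ⟨kv, hkvf, h1⟩ := List.mem_map.mp hmem
      have hkvs := List.mem_of_mem_filter hkvf
      have hkv := List.of_mem_filter hkvf
      have : kv = p := pv_mem_fst_unique hfnd hkvs hps h1
      subst this
      rw [Bool.not_eq_eq_eq_not, Bool.not_true, decide_eq_false_iff_not] at hkv
      rw [hmins kv.1] at hkv
      exact hkv hc
    simp [List.contains_eq_mem, hnotmem, hc]
  · -- deleted: its key is among the deleted keys
    have hmem : p.1 ∈ (s.filter (fun kv => !decide (kv.2 <
        ((s.filter (fun qw => decide (qw.1 < kv.1))).map (fun qw => qw.2)).foldl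
          min 1000000000))).map (fun kv => kv.1) := by
      apply List.mem_map_of_mem
      apply List.mem_filter.mpr
      refine ⟨hps, ?_⟩
      rw [hmins p.1]
      simp [hc]
    simp [List.contains_eq_mem, hmem, hc]


-- ---- the inner speed loop, A (over keys) vs B (over items) ----

theorem pv_inner_eq (j el : Int) (d c : PySem.Dict Int Int) (hnd : d.keys.Nodup) :
    pvA_inner j el d c = d.items.foldl (fun c sc =>
      let m := if el == j then sc.1 else if el < j then min 10 (sc.1 + 1) else max 1 (sc.1 - 1)
      c.insert m (min (c.getD m 1000000000) (sc.2 + m))) c := by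
  unfold pvA_inner
  rw [PySem.Dict.items_eq_map_keys d hnd 0, List.foldl_map]
  apply List.foldl_ext
  intro acc speed _
  rcases lt_trichotomy el j with h | h | h
  · have hne : (el == j) = false := by simp [ne_of_lt h]
    simp [h, hne]
  · subst h
    simp
  · have hne : (el == j) = false := by simp [ne_of_gt h]
    simp [h, hne, not_lt.mpr (le_of_lt h)]

theorem pv_cand_eq (dp : PySem.Dict Int (PySem.Dict Int Int)) (j : Int) (W : List Int)
    (hinner : ∀ el, (dp.getD el PySem.Dict.empty).keys.Nodup) (c0 : PySem.Dict Int Int) :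
    W.foldl (fun c el => pvA_inner j el (dp.getD el PySem.Dict.empty) c) c0
      = W.foldl (fun c el => (dp.getD el PySem.Dict.empty).items.foldl (fun c sc =>
          let m := if el == j then sc.1 else if el < j then min 10 (sc.1 + 1) else max 1 (sc.1 - 1)
          c.insert m (min (c.getD m 1000000000) (sc.2 + m))) c) c0 := by
  apply List.foldl_ext
  intro acc el _
  exact pv_inner_eq j el _ acc (hinner el)

theorem pv_cand_nodup (dp : PySem.Dict Int (PySem.Dict Int Int)) (j : Int) (W : List Int) :
    ∀ c0 : PySem.Dict Int Int, c0.keys.Nodup →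
    (W.foldl (fun c el => (dp.getD el PySem.Dict.empty).items.foldl (fun c sc =>
        let m := if el == j then sc.1 else if el < j then min 10 (sc.1 + 1) else max 1 (sc.1 - 1)
        c.insert m (min (c.getD m 1000000000) (sc.2 + m))) c) c0).keys.Nodup := by
  induction W with
  | nil => intro c0 h; exact h
  | cons el W ih =>
    intro c0 h
    apply ih
    exact PySem.Dict.nodup_keys_foldl_insert_key _
      (fun sc : Int × Int =>
        if el == j then sc.1 else if el < j then min 10 (sc.1 + 1) else max 1 (sc.1 - 1))
      (fun c sc =>
        min (c.getD (if el == j then sc.1 else if el < j then min 10 (sc.1 + 1)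
          else max 1 (sc.1 - 1)) 1000000000)
          (sc.2 + (if el == j then sc.1 else if el < j then min 10 (sc.1 + 1)
            else max 1 (sc.1 - 1)))) c0 h

theorem pv_getD_le (c : PySem.Dict Int Int) (L : Int) (h : ∀ v ∈ c.values, v ≤ L) (k : Int) :
    c.getD k L ≤ L := by
  cases hc : c.get? k with
  | none => rw [PySem.Dict.getD_of_get?_eq_none c L hc]
  | some v =>
    rw [PySem.Dict.getD_of_get?_eq_some c L hc]
    exact h v (List.mem_map_of_mem (PySem.Dict.mem_items_of_get?_eq_some c hc))

theorem pv_inner_vals_le (j el : Int) (l : List (Int × Int)) :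
    ∀ c : PySem.Dict Int Int, (∀ v ∈ c.values, v ≤ 1000000000) →
    ∀ v ∈ (l.foldl (fun c sc =>
        let m := if el == j then sc.1 else if el < j then min 10 (sc.1 + 1) else max 1 (sc.1 - 1)
        c.insert m (min (c.getD m 1000000000) (sc.2 + m))) c).values, v ≤ 1000000000 := by
  induction l with
  | nil => intro c h; exact h
  | cons sc l ih =>
    intro c h
    apply ih
    intro v hv
    rcases PySem.Dict.mem_values_insert _ _ _ _ hv with h1 | h1
    · rw [h1]
      exact le_trans (min_le_left _ _) (pv_getD_le c 1000000000 h _)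
    · exact h v h1

theorem pv_cand_vals_le (dp : PySem.Dict Int (PySem.Dict Int Int)) (j : Int) (W : List Int) :
    ∀ c0 : PySem.Dict Int Int, (∀ v ∈ c0.values, v ≤ 1000000000) →
    ∀ v ∈ (W.foldl (fun c el => (dp.getD el PySem.Dict.empty).items.foldl (fun c sc =>
        let m := if el == j then sc.1 else if el < j then min 10 (sc.1 + 1) else max 1 (sc.1 - 1)
        c.insert m (min (c.getD m 1000000000) (sc.2 + m))) c) c0).values, v ≤ 1000000000 := by
  induction W with
  | nil => intro c0 h; exact h
  | cons el W ih =>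
    intro c0 h
    exact ih _ (pv_inner_vals_le j el _ c0 h)


-- ---- takeWhile / dropWhile helpers for the sliding window ----

theorem pv_tw_le {p : Int → Bool} (l : List Int) : (l.takeWhile p).length ≤ l.length :=
  (List.takeWhile_sublist p).length_le

theorem pv_tw_getElem {p : Int → Bool} {l : List Int} {i : Nat}
    (h : i < (l.takeWhile p).length) :
    p (l[i]'(lt_of_lt_of_le h (pv_tw_le l))) = true := by
  have hpre := List.takeWhile_prefix (l := l) p
  have heq := hpre.getElem h
  have h2 := List.mem_takeWhile_imp (l := l) (p := p) (List.getElem_mem h)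
  rwa [heq] at h2

theorem pv_tw_stop {p : Int → Bool} (l : List Int)
    (h : (l.takeWhile p).length < l.length) :
    p (l[(l.takeWhile p).length]'h) = false := by
  induction l with
  | nil => simp at h
  | cons a l ih =>
    cases hp : p a
    · simp only [List.takeWhile_cons_of_neg (p := p) (a := a) (l := l) (by simp [hp]),
        List.length_nil, List.getElem_cons_zero]
      exact hp
    · have h' := h
      simp only [List.takeWhile_cons_of_pos (p := p) hp, List.length_cons] at h' ⊢
      simp only [List.getElem_cons_succ]
      exact ih (by omega)

theorem pv_drop_tw {p : Int → Bool} (l : List Int) :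
    l.drop (l.takeWhile p).length = l.dropWhile p := by
  have h : l = l.takeWhile p ++ l.dropWhile p := List.takeWhile_append_dropWhile.symm
  nth_rewrite 2 [h]
  exact List.drop_left

theorem pv_tw_mono {p q : Int → Bool} (l : List Int) (h : ∀ a, p a = true → q a = true) :
    (l.takeWhile p).length ≤ (l.takeWhile q).length := by
  induction l with
  | nil => simp
  | cons a l ih =>
    cases hp : p a
    · rw [List.takeWhile_cons_of_neg (by simp [hp])]
      simp
    · rw [List.takeWhile_cons_of_pos hp, List.takeWhile_cons_of_pos (h a hp)]
      simpa using ih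

-- ---- the 'start' advancing loop reaches the takeWhile boundary ----

theorem pv_adv_eq (dvals : List Int) (j : Int) : ∀ start,
    start ≤ (dvals.takeWhile (fun e => decide (e < j - 5))).length →
    pvA_adv dvals j start = (dvals.takeWhile (fun e => decide (e < j - 5))).length := by
  intro start hstart
  fun_induction pvA_adv dvals j start with
  | case1 start h hlt ih =>
    apply ih
    rcases Nat.lt_or_ge start (dvals.takeWhile (fun e => decide (e < j - 5))).length with h1 | h1
    · omega
    · exfalso
      have heq : start = (dvals.takeWhile (fun e => decide (e < j - 5))).length := by omega
      subst heq
      have := pv_tw_stop dvals h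
      simp only [decide_eq_false_iff_not] at this
      exact this hlt
  | case2 start h hlt =>
    rcases Nat.lt_or_ge start (dvals.takeWhile (fun e => decide (e < j - 5))).length with h1 | h1
    · exfalso
      have := pv_tw_getElem h1
      simp only [decide_eq_true_eq] at this
      exact hlt this
    · omega
  | case3 start h =>
    have := pv_tw_le (p := fun e => decide (e < j - 5)) dvals
    omega

-- ---- the window scan as a fold over a takeWhile ----

theorem pv_window_eq (dp : PySem.Dict Int (PySem.Dict Int Int)) (dvals : List Int) (j : Int) :
    ∀ (cur : Nat) (c : PySem.Dict Int Int),
    pvA_window dp dvals j cur c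
      = ((dvals.drop cur).takeWhile (fun e => decide (e ≤ j + 5))).foldl
          (fun c el => pvA_inner j el (dp.getD el PySem.Dict.empty) c) c := by
  intro cur c
  fun_induction pvA_window dp dvals j cur c with
  | case1 cur c h hle ih =>
    rw [List.drop_eq_getElem_cons h, List.takeWhile_cons]
    simp only [hle, decide_true]
    exact ih
  | case2 cur c h hle =>
    rw [List.drop_eq_getElem_cons h, List.takeWhile_cons]
    simp [hle]
  | case3 cur c h =>
    rw [List.drop_eq_nil_iff.mpr (by omega)]
    simp

-- ---- on a sorted list the window is a filter ----

theorem pv_tw_sorted (c : Int) (l : List Int) (h : l.Pairwise (· ≤ ·)) :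
    l.takeWhile (fun e => decide (e ≤ c)) = l.filter (fun e => decide (e ≤ c)) := by
  induction l with
  | nil => rfl
  | cons a l ih =>
    have hhead := (List.pairwise_cons.mp h).1
    have ht := (List.pairwise_cons.mp h).2
    by_cases ha : a ≤ c
    · rw [List.takeWhile_cons_of_pos (by simpa using ha),
        List.filter_cons_of_pos (by simpa using ha), ih ht]
    · have hnil : l.filter (fun e => decide (e ≤ c)) = [] := by
        apply List.filter_eq_nil_iff.mpr
        intro x hx
        simp only [decide_eq_true_eq]
        intro hxc
        exact ha (le_trans (hhead x hx) hxc)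
      rw [List.takeWhile_cons_of_neg (by simpa using ha),
        List.filter_cons_of_neg (by simpa using ha), hnil]

theorem pv_dw_sorted (c : Int) (l : List Int) (h : l.Pairwise (· ≤ ·)) :
    l.dropWhile (fun e => decide (e < c)) = l.filter (fun e => !decide (e < c)) := by
  induction l with
  | nil => rfl
  | cons a l ih =>
    have hhead := (List.pairwise_cons.mp h).1
    have ht := (List.pairwise_cons.mp h).2
    by_cases ha : a < c
    · rw [List.dropWhile_cons_of_pos (by simpa using ha),
        List.filter_cons_of_neg (by simpa using ha), ih ht]
    · have hself : l.filter (fun e => !decide (e < c)) = l := by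
        apply List.filter_eq_self.mpr
        intro x hx
        simp only [Bool.not_eq_eq_eq_not, Bool.not_true, decide_eq_false_iff_not]
        intro hxc
        exact ha (lt_of_le_of_lt (hhead x hx) hxc)
      rw [List.dropWhile_cons_of_neg (by simpa using ha),
        List.filter_cons_of_pos (by simpa using ha), hself]

theorem pv_window_list (j : Int) (l : List Int) (h : l.Pairwise (· ≤ ·)) :
    ((l.dropWhile (fun e => decide (e < j - 5))).takeWhile (fun e => decide (e ≤ j + 5)))
      = l.filter (fun e => decide (j - 5 ≤ e ∧ e ≤ j + 5)) := by
  rw [pv_dw_sorted _ _ h, pv_tw_sorted _ _ (h.filter _), List.filter_filter]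
  apply List.filter_congr
  intro x _
  by_cases h1 : x ≤ j + 5 <;> by_cases h2 : x < j - 5 <;> simp [h1, h2] <;> omega


-- ---- sorted-list facts ----

theorem pv_le_getLast? (l : List Int) (h : l.Pairwise (· ≤ ·)) :
    ∀ x ∈ l, ∀ y, l.getLast? = some y → x ≤ y := by
  induction l with
  | nil => simp
  | cons a t ih =>
    intro x hx y hy
    cases t with
    | nil =>
      simp only [List.getLast?_singleton, Option.some.injEq] at hy
      simp only [List.mem_singleton] at hx
      omega
    | cons b t' =>
      rw [List.getLast?_cons_cons] at hy
      have hhead := (List.pairwise_cons.mp h).1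
      have ht := (List.pairwise_cons.mp h).2
      rcases List.mem_cons.mp hx with rfl | hx'
      · exact hhead y (List.mem_of_getLast? hy)
      · exact ih ht x hx' y hy

-- ---- the per-level loop: A's indexed loop with break = B's fold ----

theorem pv_level_eq (dp : PySem.Dict Int (PySem.Dict Int Int))
    (hinner : ∀ el, (dp.getD el PySem.Dict.empty).keys.Nodup)
    (dvals : List Int) (hsort : dvals.Pairwise (· ≤ ·)) :
    ∀ (p : List Int), p.Pairwise (· ≤ ·) →
    ∀ (start : Nat) (nd : PySem.Dict Int (PySem.Dict Int Int)),
    (∀ j ∈ p, start ≤ (dvals.takeWhile (fun e => decide (e < j - 5))).length) →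
    pvA_level dp dvals p start nd
      = p.foldl (fun nd j => match PySem.List.pyGet? dvals (-1) with
          | none => nd
          | some k => if k < j - 5 then nd else nd.insert j (pvB_entry dp dvals j)) nd := by
  intro p hp
  induction p with
  | nil => intro start nd _; rfl
  | cons j rest ih =>
    intro start nd hstart
    have hadv := pv_adv_eq dvals j start (hstart j (by simp))
    have hjrest : ∀ x ∈ rest, j ≤ x := (List.pairwise_cons.mp hp).1
    have hrestp := (List.pairwise_cons.mp hp).2
    rw [pvA_level, List.foldl_cons]
    simp only [hadv]
    by_cases hbrk : (dvals.takeWhile (fun e => decide (e < j - 5))).length = dvals.length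
    · -- break: every platform of the level is unreachable, B skips them all
      have hall : ∀ e ∈ dvals, e < j - 5 := by
        have heq : dvals.takeWhile (fun e => decide (e < j - 5)) = dvals :=
          (List.takeWhile_prefix _).eq_of_length hbrk
        intro e he
        have : e ∈ dvals.takeWhile (fun e => decide (e < j - 5)) := by rw [heq]; exact he
        simpa using List.mem_takeWhile_imp this
      rw [if_pos hbrk]
      have hskip : ∀ (l : List Int), (∀ x ∈ l, j ≤ x) →
          l.foldl (fun nd j => match PySem.List.pyGet? dvals (-1) with
            | none => nd
            | some k => if k < j - 5 then nd else nd.insert j (pvB_entry dp dvals j)) nd = nd := by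
        intro l
        induction l with
        | nil => intro _; rfl
        | cons x t iht =>
          intro hxl
          rw [List.foldl_cons]
          have hbody : (match PySem.List.pyGet? dvals (-1) with
              | none => nd
              | some k => if k < x - 5 then nd
                else nd.insert x (pvB_entry dp dvals x)) = nd := by
            rw [PySem.List.pyGet?_neg_one]
            cases hg : dvals.getLast? with
            | none => rfl
            | some k =>
              have hk : k < j - 5 := hall k (List.mem_of_getLast? hg)
              have hx : k < x - 5 := by have := hxl x (by simp); omega
              simp [hx]
          rw [hbody]
          exact iht (fun y hy => hxl y (List.mem_cons_of_mem x hy))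
      refine (hskip (j :: rest) ?_).symm
      intro x hx
      rcases List.mem_cons.mp hx with rfl | hx'
      · exact le_refl x
      · exact hjrest x hx'
    · -- A processes j, and so does B; the computed entries coincide
      have hTlt : (dvals.takeWhile (fun e => decide (e < j - 5))).length < dvals.length :=
        lt_of_le_of_ne (pv_tw_le dvals) hbrk
      have hne : dvals ≠ [] := by
        intro h0; rw [h0] at hTlt; simp at hTlt
      have hlast := List.getLast?_eq_some_getLast hne
      have hlastge : ¬ (dvals.getLast hne < j - 5) := by
        intro hlt
        apply hbrk
        have hself : ∀ e ∈ dvals, decide (e < j - 5) = true := by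
          intro e he
          simp only [decide_eq_true_eq]
          exact lt_of_le_of_lt (pv_le_getLast? dvals hsort e he _ hlast) hlt
        rw [List.takeWhile_eq_self_iff.mpr hself]
      have hhead : (match PySem.List.pyGet? dvals (-1) with
          | none => nd
          | some k => if k < j - 5 then nd else nd.insert j (pvB_entry dp dvals j))
          = nd.insert j (pvB_entry dp dvals j) := by
        rw [PySem.List.pyGet?_neg_one, hlast]
        simp [hlastge]
      rw [if_neg hbrk, hhead]
      have hempnd : (PySem.Dict.empty : PySem.Dict Int Int).keys.Nodup := by
        rw [PySem.Dict.keys_empty]; exact List.nodup_nil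
      have hempvals : ∀ v ∈ (PySem.Dict.empty : PySem.Dict Int Int).values,
          v ≤ 1000000000 := by
        intro v hv
        have : (PySem.Dict.empty : PySem.Dict Int Int).values = [] := rfl
        rw [this] at hv
        cases hv
      have hentry : pvA_prune (pvA_window dp dvals j
          ((dvals.takeWhile (fun e => decide (e < j - 5))).length) PySem.Dict.empty)
          = pvB_entry dp dvals j := by
        rw [pv_window_eq, pv_drop_tw, pv_window_list j dvals hsort,
          pv_cand_eq dp j _ hinner,
          pv_prune_eq _
            (pv_cand_nodup dp j _ PySem.Dict.empty hempnd)
            (pv_cand_vals_le dp j _ PySem.Dict.empty hempvals)]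
        rfl
      rw [hentry]
      apply ih hrestp
      intro j' hj'
      apply pv_tw_mono dvals
      intro a ha
      simp only [decide_eq_true_eq] at ha ⊢
      have := hjrest j' hj'
      omega


-- ---- one whole level: A's step = B's step ----

theorem pv_step_eq (dp : PySem.Dict Int (PySem.Dict Int Int))
    (hinner : ∀ el, (dp.getD el PySem.Dict.empty).keys.Nodup) (lvl : List Int) :
    pvA_step dp lvl = pvB_step dp lvl := by
  unfold pvA_step pvB_step
  exact pv_level_eq dp hinner _
    (by simpa using PySem.List.sorted_pairwise dp.keys (fun x => x))
    _ (by simpa using PySem.List.sorted_pairwise lvl (fun x => x))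
    0 PySem.Dict.empty (fun _ _ => Nat.zero_le _)

-- ---- dictionary-shape invariant carried across levels ----

def pvInv (dp : PySem.Dict Int (PySem.Dict Int Int)) : Prop :=
  dp.keys.Nodup ∧ ∀ v ∈ dp.values, v.keys.Nodup

theorem pv_inv_inner {dp : PySem.Dict Int (PySem.Dict Int Int)} (h : pvInv dp) :
    ∀ el, (dp.getD el PySem.Dict.empty).keys.Nodup := by
  intro el
  cases hc : dp.get? el with
  | none =>
    rw [PySem.Dict.getD_of_get?_eq_none dp PySem.Dict.empty hc, PySem.Dict.keys_empty]
    exact List.nodup_nil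
  | some v =>
    rw [PySem.Dict.getD_of_get?_eq_some dp PySem.Dict.empty hc]
    exact h.2 v (List.mem_map_of_mem (PySem.Dict.mem_items_of_get?_eq_some dp hc))

theorem pv_entry_nodup (dp : PySem.Dict Int (PySem.Dict Int Int)) (keys : List Int)
    (j : Int) : (pvB_entry dp keys j).keys.Nodup := by
  unfold pvB_entry
  exact PySem.Dict.nodup_keys_foldl_insert_key _ (fun kv : Int × Int => kv.1)
    (fun _ kv => kv.2) PySem.Dict.empty
    (by rw [PySem.Dict.keys_empty]; exact List.nodup_nil)

theorem pv_inv_empty : pvInv PySem.Dict.empty := by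
  constructor
  · rw [PySem.Dict.keys_empty]; exact List.nodup_nil
  · intro v hv
    have : (PySem.Dict.empty : PySem.Dict Int (PySem.Dict Int Int)).values = [] := rfl
    rw [this] at hv
    cases hv

theorem pv_foldB_inv (dp : PySem.Dict Int (PySem.Dict Int Int)) (keys : List Int)
    (p : List Int) : ∀ nd, pvInv nd →
    pvInv (p.foldl (fun nd j => match PySem.List.pyGet? keys (-1) with
      | none => nd
      | some k => if k < j - 5 then nd else nd.insert j (pvB_entry dp keys j)) nd) := by
  induction p with
  | nil => intro nd h; exact h
  | cons j t ih =>
    intro nd h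
    rw [List.foldl_cons]
    apply ih
    cases hg : PySem.List.pyGet? keys (-1) with
    | none => simpa using h
    | some k =>
      simp only
      by_cases hk : k < j - 5
      · simp [hk, h]
      · simp only [hk, if_false]
        constructor
        · exact PySem.Dict.nodup_keys_insert _ _ _ h.1
        · intro v hv
          rcases PySem.Dict.mem_values_insert _ _ _ _ hv with h1 | h1
          · rw [h1]; exact pv_entry_nodup dp keys j
          · exact h.2 v h1

theorem pv_stepB_inv (dp : PySem.Dict Int (PySem.Dict Int Int)) (lvl : List Int) :
    pvInv (pvB_step dp lvl) := by
  unfold pvB_step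
  exact pv_foldB_inv dp _ _ PySem.Dict.empty pv_inv_empty

theorem pv_fold_levels (ls : List (List Int)) :
    ∀ dp, pvInv dp →
    ls.foldl pvA_step dp = ls.foldl pvB_step dp ∧ pvInv (ls.foldl pvB_step dp) := by
  induction ls with
  | nil => intro dp h; exact ⟨rfl, h⟩
  | cons l t ih =>
    intro dp h
    rw [List.foldl_cons, List.foldl_cons, pv_step_eq dp (pv_inv_inner h) l]
    exact ih _ (pv_stepB_inv dp l)

theorem pv_dp0_inv (l : List Int) : ∀ d, pvInv d →
    pvInv (l.foldl (fun d i => d.insert i (PySem.Dict.empty.insert 5 5)) d) := by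
  induction l with
  | nil => intro d h; exact h
  | cons i t ih =>
    intro d h
    rw [List.foldl_cons]
    apply ih
    constructor
    · exact PySem.Dict.nodup_keys_insert _ _ _ h.1
    · intro v hv
      rcases PySem.Dict.mem_values_insert _ _ _ _ hv with h1 | h1
      · rw [h1]
        decide
      · exact h.2 v h1

theorem pv_costs_eq (dp : PySem.Dict Int (PySem.Dict Int Int)) (h : pvInv dp) :
    dp.keys.flatMap (fun i => (dp.getD i PySem.Dict.empty).keys.map
        (fun j => (dp.getD i PySem.Dict.empty).getD j 0))
      = dp.values.flatMap (fun d => d.values) := by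
  rw [PySem.Dict.values_eq_map_keys dp h.1 PySem.Dict.empty, List.flatMap_map]
  apply List.flatMap_congr
  intro i _
  exact (PySem.Dict.values_eq_map_keys _ (pv_inv_inner h i) 0).symm

theorem solution_eq_alt (ps : List (List Int)) : solution ps = solution_alt ps := by
  unfold solution solution_alt
  dsimp only
  rw [PySem.List.foldl_pyRange_pyGetD ps [] pvA_step _ (by norm_num : (0:Int) ≤ 1),
    PySem.List.slice_from_one]
  rw [show ((1:Int)).toNat = 1 from rfl, ← List.drop_one]
  obtain ⟨heq, hinv⟩ := pv_fold_levels (ps.drop 1) _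
    (pv_dp0_inv (PySem.List.pyGetD ps 0 []) PySem.Dict.empty pv_inv_empty)
  rw [heq, pv_costs_eq _ hinv]

-- ===== VERDICT (by name: the statement is the Claim_ definition above) =====
theorem solution_spec : Claim_equal_solution := by
  intro ps _ _
  unfold Spec_solution
  exact solution_eq_alt ps
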